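-- pv_equiv track=rewrite | github.com/lukechn99/CodeVita2020 | p1/p1.py | solve
-- ===== SOURCE A (Python) =====
-- def factorList(n):
--     factors = [n]
--     while factors[-1] != 1:
--         for i in reversed(range(factors[-1])):
--             if factors[-1] % i == 0:
--                 factors.append(i)
--                 break
--     return factors
--
-- def solve(n, m):
--     factorsN = factorList(int(n))
--     factorsM = factorList(int(m))
--     for i in range(len(factorsN)):
--         for j in range(len(factorsM)):
--             if factorsN[i] == factorsM[j]:
--                 return i + j
--     return -1
-- ===== SOURCE B (Python) =====
-- def solve(n, m):
--     def spf(x):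
--         d = 2
--         while d * d <= x:
--             if x % d == 0:
--                 return d
--             d += 1
--         return x
--
--     def chain(x):
--         out = []
--         while x != 1:
--             out.append(x)
--             x //= spf(x)
--         out.append(1)
--         return out
--
--     idx = {}
--     for j, v in enumerate(chain(int(m))):
--         if v not in idx:
--             idx[v] = j
--     for i, v in enumerate(chain(int(n))):
--         if v in idx:
--             return i + idx[v]
--     return -1
-- ===== Notes on version B (the rewrite author's own statement) =====
-- stated objective: faster
-- what changed: B builds each largest-divisor chain by dividing out the smallest prime factor found with trial division up to sqrt(x) (instead of A's downward scan from x-1 for the largest proper divisor), and finds the first shared value with a dict mapping chain-of-m values to their first index (instead of A's nested index loops).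
import Mathlib
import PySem

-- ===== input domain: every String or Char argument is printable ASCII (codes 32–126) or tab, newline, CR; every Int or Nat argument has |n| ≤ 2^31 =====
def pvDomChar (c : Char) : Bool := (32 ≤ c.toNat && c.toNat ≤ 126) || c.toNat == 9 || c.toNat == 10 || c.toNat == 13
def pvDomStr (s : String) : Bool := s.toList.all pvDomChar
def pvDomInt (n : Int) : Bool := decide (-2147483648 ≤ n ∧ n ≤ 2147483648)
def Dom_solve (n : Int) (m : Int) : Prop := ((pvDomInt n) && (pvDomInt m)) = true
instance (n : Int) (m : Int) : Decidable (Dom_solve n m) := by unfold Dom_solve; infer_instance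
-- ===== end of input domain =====

-- B replaces A's downward scan for the largest proper divisor by smallest-factor trial division
-- up to √x and replaces A's nested first-match loops by one dict lookup pass: asymptotically faster.


-- ===== PORT A =====
-- inner 'for i in reversed(range(factors[-1]))' loop: i = k, k-1, …, 1; reaching i = 0
-- (Python: ZeroDivisionError) is 'none'
def lpdScan (x : Int) : Nat → Option Int
  | 0 => none
  | k + 1 => if PySem.Int.mod x ((k : Int) + 1) = 0 then some ((k : Int) + 1) else lpdScan x k

-- 'while factors[-1] != 1' of factorList, with fuel (sufficient for x ≥ 1; Python diverges for x ≤ 0)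
def chainA : Nat → Int → List Int
  | 0, x => [x]
  | f + 1, x =>
    if x = 1 then [x]
    else
      match lpdScan x (x - 1).toNat with
      | some d => x :: chainA f d
      | none => [x]

-- 'for j in range(len(factorsM))'
def innerJ (v : Int) : List Int → Int → Option Int
  | [], _ => none
  | y :: ys, j => if y = v then some j else innerJ v ys (j + 1)

-- 'for i in range(len(factorsN))'
def outerI (fM : List Int) : List Int → Int → Int
  | [], _ => -1
  | v :: vs, i =>
    match innerJ v fM 0 with
    | some j => i + j
    | none => outerI fM vs (i + 1)

def solve (n : Int) (m : Int) : Int :=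
  outerI (chainA (m.toNat + 1) m) (chainA (n.toNat + 1) n) 0

-- ===== PORT B =====
-- 'while d*d <= x' trial division, with fuel
def spfGo (x : Int) : Nat → Int → Int
  | 0, _ => x
  | f + 1, d =>
    if d * d ≤ x then (if PySem.Int.mod x d = 0 then d else spfGo x f (d + 1)) else x

def spf (x : Int) : Int := spfGo x (x.toNat + 2) 2

-- 'while x != 1: out.append(x); x //= spf(x)', then 'out.append(1)', with fuel
def chainB : Nat → Int → List Int
  | 0, x => [x]
  | f + 1, x => if x = 1 then [1] else x :: chainB f (PySem.Int.floordiv x (spf x))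

-- 'for j, v in enumerate(chain(m)): if v not in idx: idx[v] = j'
def buildIdx : List Int → Int → PySem.Dict Int Int → PySem.Dict Int Int
  | [], _, d => d
  | v :: vs, j, d => buildIdx vs (j + 1) (if d.contains v then d else d.insert v j)

-- 'for i, v in enumerate(chain(n)): if v in idx: return i + idx[v]'
def searchB (idx : PySem.Dict Int Int) : List Int → Int → Int
  | [], _ => -1
  | v :: vs, i =>
    match idx.get? v with
    | some j => i + j
    | none => searchB idx vs (i + 1)

def solve_alt (n : Int) (m : Int) : Int :=
  searchB (buildIdx (chainB (m.toNat + 1) m) 0 PySem.Dict.empty) (chainB (n.toNat + 1) n) 0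

-- ===== PRECONDITION & SPEC =====
-- For n ≤ 0 or m ≤ 0 the Python A loops forever (empty reversed range) or hits i = 0
-- (ZeroDivisionError); on all n, m ≥ 1 it returns.
def Pre_solve (n : Int) (m : Int) : Prop := 1 ≤ n ∧ 1 ≤ m
instance (n : Int) (m : Int) : Decidable (Pre_solve n m) := by unfold Pre_solve; infer_instance
def pvWitness_solve : Int × Int := (12, 18)

def Spec_solve (n : Int) (m : Int) (out : Int) : Prop := out = solve_alt n m
instance (n : Int) (m : Int) (out : Int) : Decidable (Spec_solve n m out) := by unfold Spec_solve; infer_instance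

-- ===== CLAIM (what is proved, stated in full; the proofs are below) =====
def Claim_equal_solve : Prop := ∀ (n : Int) (m : Int), Dom_solve n m → Pre_solve n m → Spec_solve n m (solve n m)

-- ===== LEMMAS AND PROOFS =====

-- trial division computes the smallest prime factor
lemma spfGo_eq (N : Nat) (hN : 2 ≤ N) :
    ∀ (f : Nat) (d : Nat), 2 ≤ d → d ≤ N.minFac → N + 2 ≤ f + d →
      spfGo (N : Int) f (d : Int) = (N.minFac : Int) := by
  intro f
  induction f with
  | zero =>
    intro d hd hdle hfuel
    have := Nat.minFac_le (show 0 < N by omega)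
    omega
  | succ f ih =>
    intro d hd hdle hfuel
    simp only [spfGo]
    by_cases hsq : (d : Int) * (d : Int) ≤ (N : Int)
    · rw [if_pos hsq]
      by_cases hdvd : ((d : Int)) ∣ (N : Int)
      · rw [if_pos ((PySem.Int.mod_eq_zero_iff_dvd _ _).mpr hdvd)]
        have hdN : d ∣ N := by exact_mod_cast hdvd
        have := Nat.minFac_le_of_dvd hd hdN
        have : d = N.minFac := le_antisymm hdle this
        rw [this]
      · rw [if_neg (by rw [PySem.Int.mod_eq_zero_iff_dvd]; exact hdvd)]
        have hne : d ≠ N.minFac := by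
          intro h; exact hdvd (by exact_mod_cast h ▸ Nat.minFac_dvd N)
        have : ((d : Int) + 1) = ((d + 1 : Nat) : Int) := by push_cast; ring
        rw [this]
        exact ih (d + 1) (by omega) (by omega) (by omega)
    · rw [if_neg hsq]
      have hprime : N.Prime := by
        by_contra hnp
        have := Nat.minFac_sq_le_self (show 0 < N by omega) hnp
        have hdd : d * d ≤ N := by
          calc d * d ≤ N.minFac * N.minFac := Nat.mul_le_mul hdle hdle
          _ ≤ N := by nlinarith [this]
        exact hsq (by exact_mod_cast hdd)
      rw [hprime.minFac_eq]

lemma spf_eq (x : Int) (hx : 2 ≤ x) : spf x = (x.toNat.minFac : Int) := by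
  have hxN : x = (x.toNat : Int) := by omega
  have hN : 2 ≤ x.toNat := by omega
  have h2 : (2 : Int) = ((2 : Nat) : Int) := rfl
  unfold spf
  rw [hxN, h2]
  exact spfGo_eq x.toNat hN _ 2 (le_refl _)
    (Nat.minFac_prime (by omega)).two_le (by omega)

-- the downward scan finds the largest divisor ≤ k
lemma lpdScan_eq_some (x : Int) (m : Nat) (hm : 1 ≤ m) (hdvd : ((m : Int)) ∣ x) :
    ∀ k, m ≤ k → (∀ j : Nat, m < j → j ≤ k → ¬ ((j : Int) ∣ x)) →
      lpdScan x k = some (m : Int) := by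
  intro k
  induction k with
  | zero => intro h; omega
  | succ k ih =>
    intro hle hmax
    simp only [lpdScan]
    by_cases hdd : ((k : Int) + 1) ∣ x
    · rw [if_pos ((PySem.Int.mod_eq_zero_iff_dvd _ _).mpr hdd)]
      have : m = k + 1 := by
        by_contra hne
        exact hmax (k + 1) (by omega) (by omega) (by push_cast; exact_mod_cast hdd)
      rw [this]; push_cast; ring_nf
    · rw [if_neg (by rw [PySem.Int.mod_eq_zero_iff_dvd]; exact hdd)]
      have hmk : m ≤ k := by
        by_contra h
        have hmeq : m = k + 1 := by omega
        apply hdd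
        have he : ((k : Int) + 1) = (m : Int) := by rw [hmeq]; push_cast; ring
        rw [he]; exact hdvd
      exact ih hmk (fun j h1 h2 => hmax j h1 (by omega))

-- largest proper divisor = x / (smallest prime factor)
lemma lpd_eq (x : Int) (hx : 2 ≤ x) :
    lpdScan x (x - 1).toNat = some ((x.toNat / x.toNat.minFac : Nat) : Int) := by
  set N := x.toNat with hNdef
  have hxN : x = (N : Int) := by omega
  have hN : 2 ≤ N := by omega
  have hp2 : 2 ≤ N.minFac := (Nat.minFac_prime (by omega)).two_le
  have hpdvd : N.minFac ∣ N := Nat.minFac_dvd N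
  have hm1 : 1 ≤ N / N.minFac :=
    Nat.one_le_div_iff (by omega) |>.mpr (Nat.minFac_le (by omega))
  have hk : (x - 1).toNat = N - 1 := by omega
  rw [hk]
  apply lpdScan_eq_some x _ hm1
  · rw [hxN]; exact_mod_cast Nat.div_dvd_of_dvd hpdvd
  · have : N / N.minFac < N := Nat.div_lt_self (by omega) (by omega)
    omega
  · intro j h1 h2 hjd
    have hjN : j ∣ N := by rw [hxN] at hjd; exact_mod_cast hjd
    have hj1 : 1 ≤ j := by omega
    set q := N / j with hq
    have hNq : j * q = N := Nat.mul_div_cancel' hjN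
    have hq1 : 1 ≤ q := by
      rcases Nat.eq_zero_or_pos q with h | h
      · rw [h, Nat.mul_zero] at hNq; omega
      · exact h
    have hq2 : 2 ≤ q := by
      rcases Nat.lt_or_ge q 2 with h | h
      · exfalso
        have hq1' : q = 1 := by omega
        rw [hq1', Nat.mul_one] at hNq
        omega
      · exact h
    have hqd : q ∣ N := Nat.div_dvd_of_dvd hjN
    have hpq : N.minFac ≤ q := Nat.minFac_le_of_dvd hq2 hqd
    have : j ≤ N / N.minFac := by
      have hjq : j = N / q :=
        (Nat.div_eq_of_eq_mul_left (by omega) hNq.symm).symm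
      rw [hjq]
      exact Nat.div_le_div_left hpq (by omega)
    omega

lemma chain_eq : ∀ (f : Nat) (x : Int), 1 ≤ x → chainA f x = chainB f x := by
  intro f
  induction f with
  | zero => intro x _; rfl
  | succ f ih =>
    intro x hx
    by_cases h1 : x = 1
    · simp [chainA, chainB, h1]
    · have hx2 : 2 ≤ x := by omega
      have hdiv : PySem.Int.floordiv x (spf x) = ((x.toNat / x.toNat.minFac : Nat) : Int) := by
        rw [spf_eq x hx2]
        have hxN : x = (x.toNat : Int) := by omega
        rw [hxN, PySem.Int.floordiv_natCast]
        simp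
      simp only [chainA, chainB, if_neg h1, lpd_eq x hx2, hdiv]
      congr 1
      apply ih
      have : 1 ≤ x.toNat / x.toNat.minFac :=
        Nat.one_le_div_iff ((Nat.minFac_prime (by omega)).pos) |>.mpr (Nat.minFac_le (by omega))
      omega

lemma buildIdx_get? (v : Int) :
    ∀ (vs : List Int) (j : Int) (d : PySem.Dict Int Int),
      (buildIdx vs j d).get? v = (d.get? v).or (innerJ v vs j) := by
  intro vs
  induction vs with
  | nil => intro j d; simp [buildIdx, innerJ]
  | cons y ys ih =>
    intro j d
    simp only [buildIdx, innerJ, ih]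
    by_cases hyv : y = v
    · subst hyv
      by_cases hc : d.contains y
      · rw [if_pos hc, if_pos rfl]
        rcases Option.isSome_iff_exists.mp (by rw [← PySem.Dict.contains_eq_isSome_get? d y]; exact hc) with ⟨w, hw⟩
        rw [hw]; rfl
      · rw [if_neg hc, if_pos rfl, PySem.Dict.get?_insert_self]
        have : d.get? y = none := by
          rcases h : d.get? y with _ | w
          · rfl
          · exfalso; apply hc; rw [PySem.Dict.contains_eq_isSome_get? d y, h]; rfl
        rw [this]; rfl
    · rw [if_neg hyv]
      by_cases hc : d.contains y
      · rw [if_pos hc]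
      · rw [if_neg hc, PySem.Dict.get?_insert_of_ne d j (Ne.symm hyv)]

lemma search_eq (fM : List Int) :
    ∀ (vs : List Int) (i : Int),
      searchB (buildIdx fM 0 PySem.Dict.empty) vs i = outerI fM vs i := by
  intro vs
  induction vs with
  | nil => intro i; rfl
  | cons v rest ih =>
    intro i
    simp only [searchB, outerI, buildIdx_get?, PySem.Dict.get?_empty, Option.none_or]
    rcases innerJ v fM 0 with _ | j
    · exact ih (i + 1)
    · rfl

-- ===== VERDICT (by name: the statement is the Claim_ definition above) =====
theorem solve_spec : Claim_equal_solve := by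
  intro n m _ hpre
  unfold Spec_solve solve solve_alt
  rw [← chain_eq _ _ hpre.2, ← chain_eq _ _ hpre.1, search_eq]
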